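-- pv_equiv track=rewrite | github.com/noeddl/advent-of-code | 2017/06.py | update
-- ===== SOURCE A (Python) =====
-- import copy
--
-- def update(banks):
--     banks = copy.deepcopy(banks)
--     blocks = max(banks)
--     pos = banks.index(blocks)
--     banks[pos] = 0
--
--     for b in range(blocks):
--         pos += 1
--
--         if pos >= len(banks):
--             pos = pos - len(banks)
--
--         banks[pos] += 1
--
--     return banks
-- ===== SOURCE B (Python) =====
-- def update(banks):
--     n = len(banks)
--     blocks = max(banks)
--     pos = banks.index(blocks)
--     q, r = divmod(max(blocks, 0), n)
--     return [(0 if i == pos else banks[i]) + q + (1 if (i - pos - 1) % n < r else 0)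
--             for i in range(n)]
-- ===== Notes on version B (the rewrite author's own statement) =====
-- stated objective: faster
-- what changed: Replaces A's one-block-at-a-time round-robin loop (O(blocks + n) iterations) with a single O(n) pass that gives every bank blocks // n and one extra block to the blocks % n banks following the maximum.
-- outside the precondition, e.g. on update([]): A raises ValueError, B raises ValueError
import Mathlib
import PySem

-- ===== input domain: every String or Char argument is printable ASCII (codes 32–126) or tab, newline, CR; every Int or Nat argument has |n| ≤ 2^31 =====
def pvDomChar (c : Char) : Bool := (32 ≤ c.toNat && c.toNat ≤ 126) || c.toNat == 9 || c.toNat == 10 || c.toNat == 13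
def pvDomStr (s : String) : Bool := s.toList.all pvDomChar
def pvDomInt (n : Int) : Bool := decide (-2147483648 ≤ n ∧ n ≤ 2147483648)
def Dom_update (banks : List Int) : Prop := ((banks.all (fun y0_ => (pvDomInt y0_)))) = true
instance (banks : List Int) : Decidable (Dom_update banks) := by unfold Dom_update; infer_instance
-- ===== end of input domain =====

-- B replaces A's one-block-at-a-time distribution loop (O(blocks + n)) by direct
-- arithmetic — every bank gets blocks // n, the next blocks % n banks after the
-- maximum get one extra — computed in a single O(n) pass.

-- ===== PORT A =====
-- the body of A's 'for b in range(blocks)' loop (pos is always kept in [0, len))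
def updateStep (s : List Int × Int) : List Int × Int :=
  let pos1 := s.2 + 1
  let pos2 := if pos1 ≥ (s.1.length : Int) then pos1 - (s.1.length : Int) else pos1
  (s.1.set pos2.toNat (s.1.getD pos2.toNat 0 + 1), pos2)

def update (banks : List Int) : List Int :=
  let blocks := (PySem.List.max? banks (fun y => y)).getD 0
  let pos : Int := ((PySem.List.index? banks blocks).getD 0 : Nat)
  let banks1 := banks.set pos.toNat 0
  ((PySem.List.pyRange 0 blocks 1).foldl (fun s _ => updateStep s) (banks1, pos)).1

-- ===== PORT B =====
def update_alt (banks : List Int) : List Int :=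
  let n : Int := banks.length
  let blocks := (PySem.List.max? banks (fun y => y)).getD 0
  let pos : Int := ((PySem.List.index? banks blocks).getD 0 : Nat)
  let q := PySem.Int.floordiv (max blocks 0) n
  let r := PySem.Int.mod (max blocks 0) n
  (PySem.List.pyRange 0 n 1).map (fun i =>
    (if i = pos then 0 else PySem.List.pyGetD banks i 0) + q +
    (if PySem.Int.mod (i - pos - 1) n < r then 1 else 0))

-- ===== PRECONDITION & SPEC =====
-- Pre_ excludes only the empty list, on which A's max([]) raises ValueError.
def Pre_update (banks : List Int) : Prop := banks ≠ []
instance (banks : List Int) : Decidable (Pre_update banks) := by unfold Pre_update; infer_instance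
def pvWitness_update : List Int := [0, 3, 1]

def Spec_update (banks : List Int) (out : List Int) : Prop := out = update_alt banks
instance (banks : List Int) (out : List Int) : Decidable (Spec_update banks out) := by unfold Spec_update; infer_instance

-- ===== CLAIM (what is proved, stated in full; the proofs are below) =====
def Claim_equal_update : Prop := ∀ (banks : List Int), Dom_update banks → Pre_update banks → Spec_update banks (update banks)

-- ===== LEMMAS AND PROOFS =====

-- a fold that ignores the list elements is an iterate of the body
theorem foldl_const_iterate {α β : Type} (l : List α) (g : β → β) (init : β) :
    l.foldl (fun s _ => g s) init = g^[l.length] init := by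
  induction l generalizing init with
  | nil => rfl
  | cons x t ih =>
      simp [List.foldl_cons, ih, Function.iterate_succ_apply]

-- div/mod of K+1 from div/mod of K (positive modulus)
theorem succ_divmod (K n : Int) (hn : 0 < n) :
    ((K + 1) / n = if K % n + 1 = n then K / n + 1 else K / n) ∧
    ((K + 1) % n = if K % n + 1 = n then 0 else K % n + 1) := by
  have h0 : K % n + n * (K / n) = K := Int.emod_add_mul_ediv K n
  have h1 : 0 ≤ K % n := Int.emod_nonneg _ (by omega)
  have h2 : K % n < n := Int.emod_lt_of_pos _ hn
  by_cases hc : K % n + 1 = n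
  · have := (Int.ediv_emod_unique (a := K + 1) (b := n) (r := 0) (q := K / n + 1) hn).2
      (by refine ⟨by linarith [h0], by omega, by omega⟩)
    simp [hc, this.1, this.2]
  · have := (Int.ediv_emod_unique (a := K + 1) (b := n) (r := K % n + 1) (q := K / n) hn).2
      (by refine ⟨by linarith [h0], by omega, by omega⟩)
    simp [hc, this.1, this.2]

-- the counting step: one more round-robin block lands exactly where e = K % n
theorem hits_succ (n e K : Int) (hn : 0 < n) (he0 : 0 ≤ e) (he : e < n) :
    (K + 1) / n + (if e < (K + 1) % n then 1 else 0)
      = K / n + (if e < K % n then 1 else 0) + (if e = K % n then 1 else 0) := by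
  obtain ⟨hd, hm⟩ := succ_divmod K n hn
  have h1 : 0 ≤ K % n := Int.emod_nonneg _ (by omega)
  have h2 : K % n < n := Int.emod_lt_of_pos _ hn
  rw [hd, hm]
  split_ifs <;> omega

theorem loop_inv (l0 : List Int) (p0 : Nat) (hp : p0 < l0.length) (k : Nat) :
    (updateStep^[k] (l0, (p0 : Int))).1.length = l0.length ∧
    (updateStep^[k] (l0, (p0 : Int))).2 = ((p0 : Int) + k) % (l0.length : Int) ∧
    ∀ i : Nat, i < l0.length →
      (updateStep^[k] (l0, (p0 : Int))).1.getD i 0 =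
        l0.getD i 0 + (k : Int) / (l0.length : Int)
          + (if ((i : Int) - p0 - 1) % (l0.length : Int) < (k : Int) % (l0.length : Int) then 1 else 0) := by
  have hn : (0 : Int) < (l0.length : Int) := by exact_mod_cast Nat.pos_of_ne_zero (by omega)
  induction k with
  | zero =>
      refine ⟨rfl, ?_, ?_⟩
      · have h := Int.emod_eq_of_lt (a := (p0 : Int)) (b := (l0.length : Int))
          (by positivity) (by exact_mod_cast hp)
        simpa using h.symm
      · intro i hi
        have he0 : 0 ≤ ((i : Int) - p0 - 1) % (l0.length : Int) := Int.emod_nonneg _ (by omega)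
        simp
        omega
  | succ k ih =>
      obtain ⟨hlen, hpos, hget⟩ := ih
      have hP0 : 0 ≤ (updateStep^[k] (l0, (p0 : Int))).2 := by
        rw [hpos]; exact Int.emod_nonneg _ (by omega)
      have hP1 : (updateStep^[k] (l0, (p0 : Int))).2 < (l0.length : Int) := by
        rw [hpos]; exact Int.emod_lt_of_pos _ hn
      obtain ⟨hd, hm⟩ := succ_divmod ((p0 : Int) + k) (l0.length : Int) hn
      rw [Function.iterate_succ_apply']
      set s := updateStep^[k] (l0, (p0 : Int)) with hs
      have hcast : ((p0 : Int) + ((k : Nat) + 1 : Nat)) % (l0.length : Int)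
          = ((p0 : Int) + k + 1) % (l0.length : Int) := by push_cast; ring_nf
      have hpos' : (if s.2 + 1 ≥ (s.1.length : Int) then s.2 + 1 - (s.1.length : Int) else s.2 + 1)
          = ((p0 : Int) + k + 1) % (l0.length : Int) := by
        rw [hlen, show (p0 : Int) + k + 1 = ((p0 : Int) + k) + 1 by ring, hm, ← hpos]
        split_ifs <;> omega
      refine ⟨?_, ?_, ?_⟩
      · simp [updateStep, hlen]
      · simp only [updateStep]
        rw [hcast, ← hpos']
      · intro i hi
        have hP'0 : 0 ≤ ((p0 : Int) + k + 1) % (l0.length : Int) := Int.emod_nonneg _ (by omega)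
        have hP'1 : ((p0 : Int) + k + 1) % (l0.length : Int) < (l0.length : Int) :=
          Int.emod_lt_of_pos _ hn
        have he0 : 0 ≤ ((i : Int) - p0 - 1) % (l0.length : Int) := Int.emod_nonneg _ (by omega)
        have he1 : ((i : Int) - p0 - 1) % (l0.length : Int) < (l0.length : Int) :=
          Int.emod_lt_of_pos _ hn
        have hh := hits_succ (l0.length : Int) (((i : Int) - p0 - 1) % (l0.length : Int)) (k : Int)
          hn he0 he1
        -- the set index as a Nat
        have hmi : (((p0 : Int) + k + 1) % (l0.length : Int)).toNat < s.1.length := by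
          rw [hlen]; omega
        -- condition translation: hitting index i iff e = k % n
        have hcond : ((((p0 : Int) + k + 1) % (l0.length : Int)).toNat = i)
            ↔ (((i : Int) - p0 - 1) % (l0.length : Int) = (k : Int) % (l0.length : Int)) := by
          have h3 : (i : Int) % (l0.length : Int) = (i : Int) :=
            Int.emod_eq_of_lt (by positivity) (by exact_mod_cast hi)
          have h4 : ((i : Int) - ((p0 : Int) + k + 1)) = ((i : Int) - p0 - 1 - k) := by ring
          constructor
          · intro h
            rw [Int.emod_eq_emod_iff_emod_sub_eq_zero]
            have : (i : Int) = ((p0 : Int) + k + 1) % (l0.length : Int) := by omega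
            have h5 : (i : Int) % (l0.length : Int) = ((p0 : Int) + k + 1) % (l0.length : Int) := by
              rw [h3]; exact this
            rw [Int.emod_eq_emod_iff_emod_sub_eq_zero] at h5
            rw [← h4]; exact h5
          · intro h
            rw [Int.emod_eq_emod_iff_emod_sub_eq_zero, ← h4,
              ← Int.emod_eq_emod_iff_emod_sub_eq_zero, h3] at h
            omega
        simp only [updateStep, hpos']
        rw [List.getD_eq_getElem?_getD, List.getElem?_set]
        have hgi := hget i hi
        have hgm := hget ((((p0 : Int) + k + 1) % (l0.length : Int)).toNat) (by rw [hlen] at hmi; exact hmi)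
        have hsl : s.1[i]? = some (s.1.getD i 0) := by
          rw [List.getD_eq_getElem?_getD] at hgi ⊢
          rcases h : s.1[i]? with _ | v
          · exfalso; rw [List.getElem?_eq_none_iff] at h; omega
          · simp
        by_cases hc : (((p0 : Int) + k + 1) % (l0.length : Int)).toNat = i
        · -- the incremented position
          rw [if_pos hc, if_pos hmi]
          simp only [Option.getD_some]
          rw [hc, hgi]
          have hck : ((i : Int) - p0 - 1) % (l0.length : Int) = (k : Int) % (l0.length : Int) :=
            hcond.mp hc
          push_cast
          split_ifs at hh ⊢ <;> omega
        · rw [if_neg hc, hsl]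
          simp only [Option.getD_some]
          rw [hgi]
          have hck : ¬ (((i : Int) - p0 - 1) % (l0.length : Int) = (k : Int) % (l0.length : Int)) :=
            fun h => hc (hcond.mpr h)
          push_cast
          split_ifs at hh ⊢ <;> omega

-- ===== VERDICT (by name: the statement is the Claim_ definition above) =====
theorem update_spec : Claim_equal_update := by
  intro banks hdom hpre
  unfold Spec_update update update_alt
  obtain ⟨M, hM, hMmem⟩ : ∃ M, PySem.List.max? banks (fun y => y) = some M ∧ M ∈ banks := by
    cases banks with
    | nil => exact absurd rfl hpre
    | cons x t =>
        refine ⟨t.foldl max x, PySem.List.max?_id_cons x t, ?_⟩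
        rcases PySem.List.foldl_max_mem t x with h | h
        · rw [h]; exact List.mem_cons_self
        · exact List.mem_cons_of_mem _ h
  obtain ⟨p0, hp0⟩ : ∃ p0, PySem.List.index? banks M = some p0 := by
    have h := (PySem.List.index?_isSome_iff banks M).mpr hMmem
    exact Option.isSome_iff_exists.mp h
  obtain ⟨hp0lt, -, -⟩ := PySem.List.getElem_of_index?_eq_some hp0
  have hn : (0 : Int) < (banks.length : Int) := by exact_mod_cast Nat.pos_of_ne_zero (by omega)
  simp only [hM, hp0, Option.getD_some, Int.toNat_natCast]
  rw [foldl_const_iterate, PySem.List.length_pyRange_one]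
  have hp0lt' : p0 < (banks.set p0 0).length := by simpa using hp0lt
  obtain ⟨hL, -, hG⟩ := loop_inv (banks.set p0 0) p0 hp0lt' (M - 0).toNat
  have hlenset : (banks.set p0 0).length = banks.length := List.length_set
  apply List.ext_getElem
  · rw [hL, hlenset]
    simp [PySem.List.length_pyRange_one]
  · intro i h1 h2
    have hi : i < banks.length := by rw [← hlenset, ← hL]; exact h1
    have hKcast : (((M - 0).toNat : Nat) : Int) = max M 0 := by
      rw [Int.toNat_eq_max]; ring_nf
    have hgd := hG i (by rwa [hlenset])
    rw [hlenset, hKcast] at hgd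
    have hL' : (updateStep^[(M - 0).toNat] (banks.set p0 0, (p0 : Int))).1.getD i 0
        = (updateStep^[(M - 0).toNat] (banks.set p0 0, (p0 : Int))).1[i]'h1 :=
      List.getD_eq_getElem _ _ h1
    rw [← hL', hgd]
    rw [List.getElem_map, PySem.List.getElem_pyRange_one]
    simp only [zero_add]
    rw [PySem.Int.floordiv_eq_ediv_of_pos hn, PySem.Int.mod_eq_emod_of_pos hn,
      PySem.Int.mod_eq_emod_of_pos hn]
    rw [List.getD_eq_getElem?_getD, List.getElem?_set]
    rw [PySem.List.pyGetD_natCast]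
    have hiv : banks.getD i 0 = banks[i]'hi := List.getD_eq_getElem _ _ hi
    have hcond : ((i : Int) = (p0 : Int)) ↔ (p0 = i) := by
      constructor <;> intro h <;> omega
    rw [List.getElem?_eq_getElem hi]
    simp only [hiv]
    by_cases hc : p0 = i
    · rw [if_pos hc, if_pos (by omega), if_pos (hcond.mpr hc)]
      simp
    · rw [if_neg hc, if_neg (fun h => hc (hcond.mp h))]
      simp
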